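-- pv_equiv track=rewrite | github.com/noamjgal/Surreal-Fragmentation | SURREAL/episode-preprocessing/window_fragmentation.py | extract_participant_number
-- ===== SOURCE A (Python) =====
-- def extract_participant_number(participant_id: str) -> str:
--     """Extract just the numeric portion from a participant ID"""
--     # Remove common prefixes
--     id_clean = participant_id.lower()
--     for prefix in ['surreal', 'surreal_', 'surreal-']:
--         if id_clean.startswith(prefix):
--             id_clean = id_clean[len(prefix):]
--
--     # Remove 'p' suffix if present
--     if id_clean.endswith('p'):
--         id_clean = id_clean[:-1]
--
--     # Extract only digits
--     digits = ''.join(c for c in id_clean if c.isdigit())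
--
--     # Remove leading zeros
--     if digits:
--         return digits.lstrip('0')
--
--     return ""
-- ===== SOURCE B (Python) =====
-- def extract_participant_number(participant_id: str) -> str:
--     """Extract just the numeric portion from a participant ID"""
--     # One flat pass: only digits survive anyway, and no stripped prefix/suffix
--     # contains a digit, so filter the original string directly.
--     digits = ''.join(c for c in participant_id if c.isdigit())
--     return digits.lstrip('0')
-- ===== Notes on version B (the rewrite author's own statement) =====
-- stated objective: simpler
-- what changed: B drops A's four sequential passes (lowercase, prefix-strip loop, 'p'-suffix strip, emptiness branch) and is a single digit filter over the original string followed by lstrip('0'); equivalent because none of the stripped material contains digits.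
import Mathlib
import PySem

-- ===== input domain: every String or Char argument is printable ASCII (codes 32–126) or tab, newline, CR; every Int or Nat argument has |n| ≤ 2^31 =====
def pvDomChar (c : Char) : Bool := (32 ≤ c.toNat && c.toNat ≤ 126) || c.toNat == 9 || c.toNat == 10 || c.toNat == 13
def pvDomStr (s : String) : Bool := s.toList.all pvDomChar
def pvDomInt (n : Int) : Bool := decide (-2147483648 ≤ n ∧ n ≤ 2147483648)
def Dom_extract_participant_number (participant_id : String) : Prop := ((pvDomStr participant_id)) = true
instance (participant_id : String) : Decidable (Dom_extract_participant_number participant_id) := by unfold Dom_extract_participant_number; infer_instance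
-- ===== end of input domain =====

-- B replaces A's four sequential passes (lowercase, prefix-strip loop, 'p'-suffix
-- strip, emptiness branch) with a single digit filter plus lstrip('0'): simpler.

-- ===== PORT A =====
-- lstrip('0') is ported by hand as dropWhile (· == '0'): exact — Python's
-- str.lstrip('0') removes exactly the leading '0' characters.
def extract_participant_number (participant_id : String) : String :=
  let c0 : List Char := (PySem.Str.lower participant_id).toList
  -- for prefix in ['surreal', 'surreal_', 'surreal-']: if startswith, drop len(prefix)
  let c1 := if PySem.Chars.startswith c0 "surreal".toList then PySem.List.slice c0 (some 7) none else c0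
  let c2 := if PySem.Chars.startswith c1 "surreal_".toList then PySem.List.slice c1 (some 8) none else c1
  let c3 := if PySem.Chars.startswith c2 "surreal-".toList then PySem.List.slice c2 (some 8) none else c2
  -- if id_clean.endswith('p'): id_clean = id_clean[:-1]
  let c4 := if PySem.Chars.endswith c3 "p".toList then PySem.List.slice c3 none (some (-1)) else c3
  -- digits = ''.join(c for c in id_clean if c.isdigit())
  let digits := c4.filter PySem.Chars.isdigit
  -- if digits: return digits.lstrip('0') ; return ""
  if digits ≠ [] then String.ofList (digits.dropWhile (fun c => c == '0')) else ""

-- ===== PORT B =====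
def extract_participant_number_alt (participant_id : String) : String :=
  let digits := participant_id.toList.filter PySem.Chars.isdigit
  String.ofList (digits.dropWhile (fun c => c == '0'))

-- ===== PRECONDITION & SPEC =====
def Spec_extract_participant_number (participant_id : String) (out : String) : Prop := out = extract_participant_number_alt participant_id
instance (participant_id : String) (out : String) : Decidable (Spec_extract_participant_number participant_id out) := by unfold Spec_extract_participant_number; infer_instance

-- ===== CLAIM (what is proved, stated in full; the proofs are below) =====
def Claim_equal_extract_participant_number : Prop := ∀ (participant_id : String), Dom_extract_participant_number participant_id → Spec_extract_participant_number participant_id (extract_participant_number participant_id)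

-- ===== LEMMAS AND PROOFS =====

theorem pv_isdigit_iff (c : Char) :
    PySem.Chars.isdigit c = true ↔ (48 ≤ c.val.toNat ∧ c.val.toNat ≤ 57) := by
  simp [PySem.Chars.isdigit, Char.le_def, UInt32.le_iff_toNat_le]

theorem pv_isupper_iff (c : Char) :
    PySem.Chars.isupper c = true ↔ (65 ≤ c.val.toNat ∧ c.val.toNat ≤ 90) := by
  simp [PySem.Chars.isupper, Char.le_def, UInt32.le_iff_toNat_le]

-- lowercasing never changes whether a character is a digit
theorem pv_isdigit_lowerChar (c : Char) :
    PySem.Chars.isdigit (PySem.Chars.lowerChar c) = PySem.Chars.isdigit c := by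
  unfold PySem.Chars.lowerChar
  split_ifs with h
  · rw [pv_isupper_iff] at h
    have hv : (Char.ofNat (c.toNat + 32)).val.toNat = c.toNat + 32 := by
      have hval : (c.toNat + 32).isValidChar := by
        left
        have := h.2
        unfold Char.toNat
        omega
      simp only [Char.ofNat, Char.ofNatAux, hval, dif_pos]
      rfl
    have l1 : PySem.Chars.isdigit (Char.ofNat (c.toNat + 32)) = false := by
      rw [Bool.eq_false_iff, Ne, pv_isdigit_iff, hv]
      unfold Char.toNat
      omega
    have l2 : PySem.Chars.isdigit c = false := by
      rw [Bool.eq_false_iff, Ne, pv_isdigit_iff]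
      have := h.1
      omega
    rw [l1, l2]
  · rfl

-- lowercasing fixes a digit character
theorem pv_lowerChar_digit (c : Char) (h : PySem.Chars.isdigit c = true) :
    PySem.Chars.lowerChar c = c := by
  unfold PySem.Chars.lowerChar
  rw [pv_isdigit_iff] at h
  have hu : PySem.Chars.isupper c = false := by
    rw [Bool.eq_false_iff, Ne, pv_isupper_iff]
    omega
  simp [hu]

-- the digits of the lowercased string are the digits of the string
theorem pv_filter_lower (l : List Char) :
    (PySem.Chars.lower l).filter PySem.Chars.isdigit = l.filter PySem.Chars.isdigit := by
  induction l with
  | nil => rfl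
  | cons c t ih =>
    simp only [PySem.Chars.lower, List.map_cons, List.filter_cons, pv_isdigit_lowerChar] at *
    by_cases h : PySem.Chars.isdigit c = true
    · simp [h, pv_lowerChar_digit c h, ih]
    · simp only [Bool.not_eq_true] at h
      simp [h, ih]

-- stripping a digit-free prefix (if present) does not change the digits
theorem pv_strip_digits (l p : List Char) (a : Int) (ha : 0 ≤ a)
    (hn : a.toNat = p.length) (hp : p.filter PySem.Chars.isdigit = []) :
    (if PySem.Chars.startswith l p then PySem.List.slice l (some a) none else l).filter
        PySem.Chars.isdigit = l.filter PySem.Chars.isdigit := by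
  split_ifs with h
  · obtain ⟨t, rfl⟩ := (PySem.Chars.startswith_iff _ _).1 h
    rw [PySem.List.slice_from _ ha, hn, List.drop_left]
    simp [List.filter_append, hp]
  · rfl

-- dropping the trailing 'p' (if present) does not change the digits
theorem pv_psuffix_digits (l : List Char) :
    (if PySem.Chars.endswith l "p".toList then PySem.List.slice l none (some (-1)) else l).filter
        PySem.Chars.isdigit = l.filter PySem.Chars.isdigit := by
  split_ifs with h
  · obtain ⟨t, rfl⟩ := (PySem.Chars.endswith_iff _ _).1 h
    rw [PySem.List.slice_to_neg_one]
    have : ("p".toList : List Char) = ['p'] := rfl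
    rw [this, List.dropLast_concat]
    simp only [List.filter_append]
    have hd : PySem.Chars.isdigit 'p' = false := by decide
    simp [hd]
  · rfl

-- ===== VERDICT (by name: the statement is the Claim_ definition above) =====
theorem extract_participant_number_spec : Claim_equal_extract_participant_number := by
  intro s _hdom
  unfold Spec_extract_participant_number extract_participant_number extract_participant_number_alt
  simp only []
  rw [pv_psuffix_digits, pv_strip_digits _ _ _ (by norm_num) (by decide) (by decide),
      pv_strip_digits _ _ _ (by norm_num) (by decide) (by decide),
      pv_strip_digits _ _ _ (by norm_num) (by decide) (by decide),
      PySem.Str.toList_lower, pv_filter_lower]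
  split_ifs with h
  · rfl
  · simp only [ne_eq, not_not] at h
    rw [h]
    rfl
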